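-- pv_equiv track=rewrite | github.com/purvanshh/DRISE-experiments | src/document_intelligence_engine/pipelines/rag_llm.py | _fallback_scalar_text
-- ===== SOURCE A (Python) =====
-- from typing import Any
--
-- def _fallback_scalar_text(raw_text: str) -> str | None:
--     for line in reversed([line.strip() for line in raw_text.splitlines() if line.strip()]):
--         if line.lower() == "null":
--             continue
--         candidate = line.split(":", maxsplit=1)[1].strip() if ":" in line else line
--         cleaned = _clean_scalar_text(candidate)
--         if cleaned:
--             return cleaned
--     return None
--
-- def _clean_scalar_text(value: Any) -> str | None:
--     if value is None:
--         return None
--     text = str(value).strip().strip('"').strip("'").strip()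
--     return text or None
-- ===== SOURCE B (Python) =====
-- def _fallback_scalar_text(raw_text: str) -> str | None:
--     result = None
--     for raw_line in raw_text.splitlines():
--         line = raw_line.strip()
--         if not line or line.lower() == "null":
--             continue
--         candidate = line.split(":", 1)[1].strip() if ":" in line else line
--         cleaned = candidate.strip().strip('"').strip("'").strip()
--         if cleaned:
--             result = cleaned
--     return result
-- ===== Notes on version B (the rewrite author's own statement) =====
-- stated objective: simpler
-- what changed: Replaces the build-filter-map-reverse pipeline with early return and a separate clean helper by a single forward pass over splitlines keeping a last-valid accumulator, with the cleaning inlined.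
import Mathlib
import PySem

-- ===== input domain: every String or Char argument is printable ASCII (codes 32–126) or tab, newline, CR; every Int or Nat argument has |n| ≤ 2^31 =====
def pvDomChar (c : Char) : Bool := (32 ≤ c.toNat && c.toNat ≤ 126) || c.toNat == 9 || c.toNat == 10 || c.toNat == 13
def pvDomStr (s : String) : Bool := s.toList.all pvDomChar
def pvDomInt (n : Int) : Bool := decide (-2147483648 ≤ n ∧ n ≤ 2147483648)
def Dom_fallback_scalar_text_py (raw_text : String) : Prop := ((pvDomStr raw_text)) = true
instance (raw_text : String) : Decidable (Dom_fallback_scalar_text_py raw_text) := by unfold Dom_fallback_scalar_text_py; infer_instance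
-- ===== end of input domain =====

-- B changes the decomposition: one forward pass with a last-valid accumulator and the clean
-- helper inlined, instead of A's filtered-reversed list comprehension with early return (objective: simpler).

-- ===== PORT A =====
-- Python helper _clean_scalar_text; the 'value is None' branch is unreachable here (value is a str).
def clean_scalar_text_py (value : String) : Option String :=
  let text := PySem.Str.strip (PySem.Str.stripChars (PySem.Str.stripChars (PySem.Str.strip value) "\"") "'")
  if text = "" then none else some text

-- the 'for line in reversed(...)' loop with continue / early return
def fallback_loopA : List String → Option String
  | [] => none
  | line :: rest =>
    if PySem.Str.lower line = "null" then fallback_loopA rest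
    else
      -- Python 'line.split(":", 1)[1]': when ":" in line, splitMax? yields ≥ 2 parts, so getD 1 "" is exact
      let candidate := if PySem.Str.isIn ":" line then
          PySem.Str.strip (((PySem.Str.splitMax? line ":" 1).getD []).getD 1 "")
        else line
      let cleaned := clean_scalar_text_py candidate
      if cleaned.isSome then cleaned else fallback_loopA rest

def fallback_scalar_text_py (raw_text : String) : Option String :=
  fallback_loopA ((((PySem.Str.splitlines raw_text).filter
      (fun l => PySem.Str.strip l ≠ "")).map PySem.Str.strip).reverse)

-- ===== PORT B =====
def fallback_stepB (acc : Option String) (raw_line : String) : Option String :=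
  let line := PySem.Str.strip raw_line
  if line = "" then acc
  else if PySem.Str.lower line = "null" then acc
  else
    let candidate := if PySem.Str.isIn ":" line then
        PySem.Str.strip (((PySem.Str.splitMax? line ":" 1).getD []).getD 1 "")
      else line
    let cleaned := PySem.Str.strip (PySem.Str.stripChars (PySem.Str.stripChars (PySem.Str.strip candidate) "\"") "'")
    if cleaned = "" then acc else some cleaned

def fallback_scalar_text_py_alt (raw_text : String) : Option String :=
  (PySem.Str.splitlines raw_text).foldl fallback_stepB none

-- ===== PRECONDITION & SPEC =====
def Spec_fallback_scalar_text_py (raw_text : String) (out : Option String) : Prop := out = fallback_scalar_text_py_alt raw_text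
instance (raw_text : String) (out : Option String) : Decidable (Spec_fallback_scalar_text_py raw_text out) := by unfold Spec_fallback_scalar_text_py; infer_instance

-- ===== CLAIM (what is proved, stated in full; the proofs are below) =====
def Claim_equal_fallback_scalar_text_py : Prop := ∀ (raw_text : String), Dom_fallback_scalar_text_py raw_text → Spec_fallback_scalar_text_py raw_text (fallback_scalar_text_py raw_text)

-- ===== LEMMAS AND PROOFS =====

-- value produced by one (already stripped, nonempty) line
def pvLineVal (line : String) : Option String :=
  if PySem.Str.lower line = "null" then none
  else clean_scalar_text_py (if PySem.Str.isIn ":" line then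
      PySem.Str.strip (((PySem.Str.splitMax? line ":" 1).getD []).getD 1 "")
    else line)

theorem pv_loopA_cons (x : String) (xs : List String) :
    fallback_loopA (x :: xs) = (pvLineVal x).or (fallback_loopA xs) := by
  rw [fallback_loopA]
  simp only [pvLineVal]
  by_cases h : PySem.Str.lower x = "null"
  · simp [h]
  · simp only [if_neg h]
    cases hc : clean_scalar_text_py (if PySem.Str.isIn ":" x then
        PySem.Str.strip (((PySem.Str.splitMax? x ":" 1).getD []).getD 1 "")
      else x) <;> rfl

theorem pv_loopA_append_singleton (xs : List String) (x : String) :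
    fallback_loopA (xs ++ [x]) = (fallback_loopA xs).or (pvLineVal x) := by
  induction xs with
  | nil => simp [pv_loopA_cons, fallback_loopA]
  | cons y ys ih => simp [pv_loopA_cons, ih, Option.or_assoc]

theorem pv_stepB_eq (acc : Option String) (l : String) :
    fallback_stepB acc l =
      if PySem.Str.strip l = "" then acc else (pvLineVal (PySem.Str.strip l)).or acc := by
  simp only [fallback_stepB, pvLineVal, clean_scalar_text_py]
  split_ifs <;> rfl

theorem pv_key (ls : List String) (acc : Option String) :
    ls.foldl fallback_stepB acc =
      (fallback_loopA (((ls.filter (fun l => PySem.Str.strip l ≠ "")).map PySem.Str.strip).reverse)).or acc := by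
  induction ls generalizing acc with
  | nil => simp [fallback_loopA]
  | cons l t ih =>
    by_cases h : PySem.Str.strip l = ""
    · simp [List.foldl_cons, ih, pv_stepB_eq, h]
    · simp [List.foldl_cons, ih, pv_stepB_eq, h, pv_loopA_append_singleton, Option.or_assoc]

-- ===== VERDICT (by name: the statement is the Claim_ definition above) =====
theorem fallback_scalar_text_py_spec : Claim_equal_fallback_scalar_text_py := by
  intro raw_text _
  unfold Spec_fallback_scalar_text_py fallback_scalar_text_py fallback_scalar_text_py_alt
  rw [pv_key]
  simp
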